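-- pv_equiv track=rewrite | github.com/alexandraback/datacollection | solutions_5738606668808192_0/Python/math10/codefight.py | anyBaseToDecimal
-- ===== SOURCE A (Python) =====
-- def anyBaseToDecimal(base,num):
--     l = len(num)
--     p = 1
--     ans = 0
--     for i in range(l):
--         if num[i] == '1':
--            ans += p
--         p *= base
--     return ans
-- ===== SOURCE B (Python) =====
-- def anyBaseToDecimal(base, num):
--     ans = 0
--     for c in reversed(num):
--         ans = ans * base + (1 if c == '1' else 0)
--     return ans
-- ===== Notes on version B (the rewrite author's own statement) =====
-- stated objective: idiomatic
-- what changed: Replaces the little-endian power-accumulating loop (explicit p *= base) with Horner's method over the reversed string, keeping only a single running accumulator.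
import Mathlib
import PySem

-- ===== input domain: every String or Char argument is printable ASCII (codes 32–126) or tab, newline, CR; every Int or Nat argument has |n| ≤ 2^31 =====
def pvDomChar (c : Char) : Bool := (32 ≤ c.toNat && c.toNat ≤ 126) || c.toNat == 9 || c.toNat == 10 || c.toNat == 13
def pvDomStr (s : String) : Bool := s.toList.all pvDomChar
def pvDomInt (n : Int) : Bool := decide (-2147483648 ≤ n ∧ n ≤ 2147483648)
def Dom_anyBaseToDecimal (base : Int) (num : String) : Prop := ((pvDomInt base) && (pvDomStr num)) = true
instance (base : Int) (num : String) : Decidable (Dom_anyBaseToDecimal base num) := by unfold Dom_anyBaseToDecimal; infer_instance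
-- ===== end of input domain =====

-- ===== PORT A =====
-- B uses Horner's method over the reversed string instead of A's power accumulator (idiomatic rewrite).
def anyBaseToDecimal (base : Int) (num : String) : Int :=
  -- for i in range(l): if num[i]=='1': ans += p; p *= base  — left fold over the chars with state (p, ans)
  (num.toList.foldl (fun (st : Int × Int) c =>
      (st.1 * base, if c = '1' then st.2 + st.1 else st.2)) (1, 0)).2

-- ===== PORT B =====
def anyBaseToDecimal_alt (base : Int) (num : String) : Int :=
  -- for c in reversed(num): ans = ans*base + (1 if c=='1' else 0)
  num.toList.reverse.foldl (fun ans c => ans * base + (if c = '1' then 1 else 0)) 0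

-- ===== PRECONDITION & SPEC =====
def Spec_anyBaseToDecimal (base : Int) (num : String) (out : Int) : Prop := out = anyBaseToDecimal_alt base num
instance (base : Int) (num : String) (out : Int) : Decidable (Spec_anyBaseToDecimal base num out) := by unfold Spec_anyBaseToDecimal; infer_instance

-- ===== CLAIM (what is proved, stated in full; the proofs are below) =====
def Claim_equal_anyBaseToDecimal : Prop := ∀ (base : Int) (num : String), Dom_anyBaseToDecimal base num → Spec_anyBaseToDecimal base num (anyBaseToDecimal base num)

-- ===== LEMMAS AND PROOFS =====

-- ===== VERDICT (by name: the statement is the Claim_ definition above) =====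
-- positional value of a little-endian digit list
def pvVal (base : Int) : List Char → Int
  | [] => 0
  | c :: t => (if c = '1' then 1 else 0) + base * pvVal base t

theorem pvA_fold (base : Int) (l : List Char) (p ans : Int) :
    (l.foldl (fun (st : Int × Int) c =>
      (st.1 * base, if c = '1' then st.2 + st.1 else st.2)) (p, ans)).2
      = ans + p * pvVal base l := by
  induction l generalizing p ans with
  | nil => simp [pvVal]
  | cons c t ih =>
    simp only [List.foldl_cons, pvVal, ih]
    split_ifs <;> ring

theorem pvB_fold (base : Int) (l : List Char) :
    l.reverse.foldl (fun ans c => ans * base + (if c = '1' then 1 else 0)) 0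
      = pvVal base l := by
  rw [List.foldl_reverse]
  induction l with
  | nil => simp [pvVal]
  | cons c t ih =>
    simp only [List.foldr_cons, pvVal, ih]
    ring

theorem anyBaseToDecimal_spec : Claim_equal_anyBaseToDecimal := by
  intro base num _
  unfold Spec_anyBaseToDecimal anyBaseToDecimal anyBaseToDecimal_alt
  rw [pvA_fold, pvB_fold]
  ring
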